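-- pv_equiv track=rewrite | github.com/Peakergzf/empirical-model-learning-in-minizinc | dt_parser/weka_to_mzn.py | pre_process_edges
-- ===== SOURCE A (Python) =====
-- def pre_process_edges(edges):
--     # outer list indexed by each level, inner list indexed by each node
--     node_num = [[] for _ in range(len(edges))]  # bfs order
--     has_child = [[] for _ in range(len(edges))]
--
--     bfs_order = 2  # (skip the root node)
--
--     for i in range(len(edges)):
--         level = edges[i]
--         for edge in level:
--             node_num[i].append(bfs_order)
--             bfs_order += 1
--             has_child[i].append(":" not in edge)
--
--     return node_num, has_child
-- ===== SOURCE B (Python) =====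
-- def pre_process_edges(edges):
--     # offset-table first: per-level starting BFS numbers via a prefix sum over level lengths
--     lengths = [len(level) for level in edges]
--     starts = []
--     s = 2
--     for L in lengths:
--         starts.append(s)
--         s += L
--     node_num = [list(range(st, st + L)) for st, L in zip(starts, lengths)]
--     has_child = [[":" not in e for e in level] for level in edges]
--     return node_num, has_child
-- ===== Notes on version B (the rewrite author's own statement) =====
-- stated objective: alternative
-- what changed: Replaces A's single stateful counter threaded through nested appends by a prefix-sum table of per-level starting numbers, filling node_num with range() per level and has_child with an independent comprehension.
import Mathlib
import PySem

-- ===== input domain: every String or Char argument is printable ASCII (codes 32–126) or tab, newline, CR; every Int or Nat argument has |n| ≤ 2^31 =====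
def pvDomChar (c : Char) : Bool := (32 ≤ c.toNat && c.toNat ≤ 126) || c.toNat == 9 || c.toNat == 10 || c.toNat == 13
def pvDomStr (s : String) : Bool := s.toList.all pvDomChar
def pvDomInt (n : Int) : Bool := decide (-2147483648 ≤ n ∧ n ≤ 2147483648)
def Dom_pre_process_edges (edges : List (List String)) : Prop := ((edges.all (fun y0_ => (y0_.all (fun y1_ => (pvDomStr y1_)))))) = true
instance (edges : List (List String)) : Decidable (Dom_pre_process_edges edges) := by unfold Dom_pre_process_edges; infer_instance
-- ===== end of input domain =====

-- B replaces A's single running BFS counter threaded through nested appends by a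
-- prefix-sum table of per-level starting numbers, filling node_num with ranges and
-- has_child with an independent map (objective: alternative decomposition).


-- ===== PORT A =====
-- A: one pass over the levels, a single mutable bfs_order counter, appending
-- into node_num[i] / has_child[i] as it goes.
def pre_process_edges (edges : List (List String)) : List (List Int) × List (List Bool) :=
  let r := edges.foldl
    (fun (st : List (List Int) × List (List Bool) × Int) level =>
      let inner := level.foldl
        (fun (s : List Int × List Bool × Int) edge =>
          (s.1 ++ [s.2.2], s.2.1 ++ [!(PySem.Str.isIn ":" edge)], s.2.2 + 1))
        ([], [], st.2.2)
      (st.1 ++ [inner.1], st.2.1 ++ [inner.2.1], inner.2.2))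
    ([], [], 2)
  (r.1, r.2.1)

-- ===== PORT B =====
-- B: level lengths → prefix-sum start table → ranges; has_child independently.
def pre_process_edges_alt (edges : List (List String)) : List (List Int) × List (List Bool) :=
  let lengths : List Int := edges.map (fun level => (level.length : Int))
  let st := lengths.foldl (fun (p : Int × List Int) L => (p.1 + L, p.2 ++ [p.1])) (2, [])
  let node_num := (st.2.zip lengths).map (fun sl => PySem.List.pyRange sl.1 (sl.1 + sl.2) 1)
  let has_child := edges.map (fun level => level.map (fun e => !(PySem.Str.isIn ":" e)))
  (node_num, has_child)

-- ===== PRECONDITION & SPEC =====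
def Spec_pre_process_edges (edges : List (List String)) (out : List (List Int) × List (List Bool)) : Prop := out = pre_process_edges_alt edges
instance (edges : List (List String)) (out : List (List Int) × List (List Bool)) : Decidable (Spec_pre_process_edges edges out) := by unfold Spec_pre_process_edges; infer_instance

-- ===== CLAIM (what is proved, stated in full; the proofs are below) =====
def Claim_equal_pre_process_edges : Prop := ∀ (edges : List (List String)), Dom_pre_process_edges edges → Spec_pre_process_edges edges (pre_process_edges edges)

-- ===== LEMMAS AND PROOFS =====

-- the per-level node-number list starting at b, level by level
def pvNodeNums (edges : List (List String)) (b : Int) : List (List Int) :=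
  match edges with
  | [] => []
  | l :: ls => PySem.List.pyRange b (b + l.length) 1 :: pvNodeNums ls (b + l.length)

lemma pyRange_shift (b : Int) (n : Nat) :
    PySem.List.pyRange b (b + (n + 1)) 1 = b :: PySem.List.pyRange (b + 1) (b + (n + 1)) 1 := by
  rw [PySem.List.pyRange_one_cons]; omega

lemma inner_fold (level : List String) (b : Int) (a1 : List Int) (a2 : List Bool) :
    level.foldl
        (fun (s : List Int × List Bool × Int) edge =>
          (s.1 ++ [s.2.2], s.2.1 ++ [!(PySem.Str.isIn ":" edge)], s.2.2 + 1))
        (a1, a2, b)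
      = (a1 ++ PySem.List.pyRange b (b + level.length) 1,
         a2 ++ level.map (fun e => !(PySem.Str.isIn ":" e)),
         b + level.length) := by
  induction level generalizing b a1 a2 with
  | nil => simp
  | cons x xs ih =>
    simp only [List.foldl_cons, List.map_cons, List.length_cons, ih]
    rw [show ((b : Int) + ((xs.length : Nat) + 1 : Nat)) = b + (xs.length + 1) by push_cast; ring,
        pyRange_shift b xs.length,
        show (b : Int) + ((xs.length : Nat) + 1) = b + 1 + xs.length by ring]
    simp

lemma outer_fold (edges : List (List String)) (b : Int) (nn : List (List Int)) (hc : List (List Bool)) :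
    edges.foldl
      (fun (st : List (List Int) × List (List Bool) × Int) level =>
        let inner := level.foldl
          (fun (s : List Int × List Bool × Int) edge =>
            (s.1 ++ [s.2.2], s.2.1 ++ [!(PySem.Str.isIn ":" edge)], s.2.2 + 1))
          ([], [], st.2.2)
        (st.1 ++ [inner.1], st.2.1 ++ [inner.2.1], inner.2.2))
      (nn, hc, b)
    = (nn ++ pvNodeNums edges b,
       hc ++ edges.map (fun level => level.map (fun e => !(PySem.Str.isIn ":" e))),
       b + (edges.map (fun l => (l.length : Int))).sum) := by
  induction edges generalizing b nn hc with
  | nil => simp [pvNodeNums]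
  | cons l ls ih =>
    simp only [List.foldl_cons]
    rw [inner_fold, ih]
    simp only [pvNodeNums, List.map_cons, List.sum_cons, List.nil_append]
    rw [show (b : Int) + ((l.length : Nat) : Int) + (ls.map (fun l => (l.length : Int))).sum
          = b + ((l.length : Int) + (ls.map (fun l => (l.length : Int))).sum) by ring]
    simp

-- B's starts-accumulating fold, characterised
def pvStarts (lengths : List Int) (b : Int) : List Int :=
  match lengths with
  | [] => []
  | L :: Ls => b :: pvStarts Ls (b + L)

lemma starts_fold (lengths : List Int) (b : Int) (acc : List Int) :
    lengths.foldl (fun (p : Int × List Int) L => (p.1 + L, p.2 ++ [p.1])) (b, acc)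
      = (b + lengths.sum, acc ++ pvStarts lengths b) := by
  induction lengths generalizing b acc with
  | nil => simp [pvStarts]
  | cons L Ls ih =>
    simp only [List.foldl_cons, ih, pvStarts, List.sum_cons]
    rw [show b + L + Ls.sum = b + (L + Ls.sum) by ring]
    simp

lemma zip_starts (edges : List (List String)) (b : Int) :
    ((pvStarts (edges.map (fun l => (l.length : Int))) b).zip
        (edges.map (fun l => (l.length : Int)))).map
      (fun sl => PySem.List.pyRange sl.1 (sl.1 + sl.2) 1)
    = pvNodeNums edges b := by
  induction edges generalizing b with
  | nil => simp [pvStarts, pvNodeNums]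
  | cons l ls ih => simp [pvStarts, pvNodeNums, List.zip_cons_cons, ih]

-- ===== VERDICT (by name: the statement is the Claim_ definition above) =====
theorem pre_process_edges_spec : Claim_equal_pre_process_edges := by
  intro edges _
  unfold Spec_pre_process_edges pre_process_edges pre_process_edges_alt
  simp only [outer_fold, starts_fold]
  simp [← zip_starts]
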